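-- pv_equiv track=rewrite | github.com/NicholasJacob1990/iudex0 | audit_sources.py | _chunk_bounds
-- ===== SOURCE A (Python) =====
-- def _chunk_bounds(total_len: int, max_chars: int, overlap: int):
--     if total_len <= 0:
--         return [(0, 0)]
--     if total_len <= max_chars:
--         return [(0, total_len)]
--     step = max_chars - overlap
--     if step <= 0:
--         step = max_chars
--     bounds = []
--     start = 0
--     while start < total_len:
--         end = min(total_len, start + max_chars)
--         bounds.append((start, end))
--         if end >= total_len:
--             break
--         start = end - overlap
--     return bounds
-- ===== SOURCE B (Python) =====
-- def _chunk_bounds(total_len: int, max_chars: int, overlap: int):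
--     if total_len <= 0:
--         return [(0, 0)]
--     if total_len <= max_chars:
--         return [(0, total_len)]
--     step = max_chars - overlap
--     # number of chunks: either the loop breaks because a chunk reaches the end,
--     # or the next start would already be past the end
--     n = min((total_len - max_chars + step - 1) // step + 1,
--             (total_len + step - 1) // step)
--     return [(i * step, min(total_len, i * step + max_chars)) for i in range(n)]
-- ===== Notes on version B (the rewrite author's own statement) =====
-- stated objective: alternative
-- what changed: Replaces the iterate-until-sentinel while-loop by an up-front closed-form chunk count n (a min of two ceiling divisions covering the two loop-exit conditions) followed by a single comprehension generating (i*step, min(total_len, i*step+max_chars)).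
import Mathlib
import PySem

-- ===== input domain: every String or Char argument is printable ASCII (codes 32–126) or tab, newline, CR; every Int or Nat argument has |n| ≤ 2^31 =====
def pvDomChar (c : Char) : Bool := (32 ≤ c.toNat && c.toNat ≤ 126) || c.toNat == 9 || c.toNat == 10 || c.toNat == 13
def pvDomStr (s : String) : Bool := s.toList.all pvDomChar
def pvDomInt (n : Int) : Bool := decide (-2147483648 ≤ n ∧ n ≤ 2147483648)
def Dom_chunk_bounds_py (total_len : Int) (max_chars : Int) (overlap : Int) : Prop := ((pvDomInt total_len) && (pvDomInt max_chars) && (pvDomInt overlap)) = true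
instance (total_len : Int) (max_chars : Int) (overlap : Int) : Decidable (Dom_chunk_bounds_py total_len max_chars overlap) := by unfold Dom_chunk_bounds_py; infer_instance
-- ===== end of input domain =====

-- B replaces A's while-loop by a closed-form chunk count and one generation pass (objective: alternative).

-- ===== PORT A =====
-- the while-loop of A; fuel only makes the recursion total (under Pre_ it never runs out)
def chunkLoopA (fuel : Nat) (total_len : Int) (max_chars : Int) (overlap : Int)
    (start : Int) (bounds : List (Int × Int)) : List (Int × Int) :=
  match fuel with
  | 0 => bounds
  | fuel + 1 =>
    if start < total_len then
      -- e := min total_len (start + max_chars); bounds' := bounds ++ [(start, e)]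
      if total_len ≤ min total_len (start + max_chars) then
        bounds ++ [(start, min total_len (start + max_chars))]
      else chunkLoopA fuel total_len max_chars overlap
        (min total_len (start + max_chars) - overlap)
        (bounds ++ [(start, min total_len (start + max_chars))])
    else bounds

def chunk_bounds_py (total_len : Int) (max_chars : Int) (overlap : Int) : List (Int × Int) :=
  if total_len ≤ 0 then [(0, 0)]
  else if total_len ≤ max_chars then [(0, total_len)]
  else
    -- A computes `step` (with a `step <= 0` fallback) but never uses it; the loop uses `end - overlap`
    chunkLoopA (total_len.toNat + 1) total_len max_chars overlap 0 []

-- ===== PORT B =====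
def chunk_bounds_py_alt (total_len : Int) (max_chars : Int) (overlap : Int) : List (Int × Int) :=
  if total_len ≤ 0 then [(0, 0)]
  else if total_len ≤ max_chars then [(0, total_len)]
  else
    let step := max_chars - overlap
    let n := min (PySem.Int.floordiv (total_len - max_chars + step - 1) step + 1)
                 (PySem.Int.floordiv (total_len + step - 1) step)
    (PySem.List.pyRange 0 n 1).map (fun i => (i * step, min total_len (i * step + max_chars)))

-- ===== PRECONDITION & SPEC =====
-- Pre_ excludes exactly the inputs on which A's while-loop never terminates
-- (total_len > max_chars with overlap ≥ max_chars: start never advances); A returns on all other inputs.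
def Pre_chunk_bounds_py (total_len : Int) (max_chars : Int) (overlap : Int) : Prop :=
  total_len ≤ 0 ∨ total_len ≤ max_chars ∨ overlap < max_chars
instance (total_len : Int) (max_chars : Int) (overlap : Int) : Decidable (Pre_chunk_bounds_py total_len max_chars overlap) := by unfold Pre_chunk_bounds_py; infer_instance

def pvWitness_chunk_bounds_py : Int × Int × Int := (10, 4, 1)

def Spec_chunk_bounds_py (total_len : Int) (max_chars : Int) (overlap : Int) (out : List (Int × Int)) : Prop := out = chunk_bounds_py_alt total_len max_chars overlap
instance (total_len : Int) (max_chars : Int) (overlap : Int) (out : List (Int × Int)) : Decidable (Spec_chunk_bounds_py total_len max_chars overlap out) := by unfold Spec_chunk_bounds_py; infer_instance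

-- ===== CLAIM (what is proved, stated in full; the proofs are below) =====
def Claim_equal_chunk_bounds_py : Prop := ∀ (total_len : Int) (max_chars : Int) (overlap : Int), Dom_chunk_bounds_py total_len max_chars overlap → Pre_chunk_bounds_py total_len max_chars overlap → Spec_chunk_bounds_py total_len max_chars overlap (chunk_bounds_py total_len max_chars overlap)

-- ===== LEMMAS AND PROOFS =====

-- The loop, started at start = k*step with k < n, appends exactly the chunks k, k+1, …, n-1.
theorem chunkLoopA_eq (total_len max_chars overlap : Int)
    (hM : max_chars < total_len) (hov : overlap < max_chars)
    (n : Int)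
    (hn1a : total_len - max_chars ≤ (n - 1) * (max_chars - overlap) ∨
            total_len ≤ n * (max_chars - overlap))
    (hn1b : ∀ k : Int, 0 ≤ k → k < n - 1 → k * (max_chars - overlap) + max_chars < total_len)
    (hn2b : (n - 1) * (max_chars - overlap) < total_len) :
    ∀ (fuel : Nat) (k : Int) (acc : List (Int × Int)), 0 ≤ k → k < n →
      (n - k).toNat ≤ fuel →
      chunkLoopA fuel total_len max_chars overlap (k * (max_chars - overlap)) acc =
        acc ++ (PySem.List.pyRange k n 1).map
          (fun i => (i * (max_chars - overlap), min total_len (i * (max_chars - overlap) + max_chars))) := by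
  intro fuel
  induction fuel with
  | zero => intro k acc hk0 hkn hf; omega
  | succ fuel ih =>
    intro k acc hk0 hkn hf
    have hstep : 0 < max_chars - overlap := by omega
    have hstart : k * (max_chars - overlap) < total_len := by
      have : k * (max_chars - overlap) ≤ (n - 1) * (max_chars - overlap) := by
        apply mul_le_mul_of_nonneg_right (by omega) (by omega)
      omega
    rw [chunkLoopA, if_pos hstart]
    by_cases hbreak : total_len ≤ min total_len (k * (max_chars - overlap) + max_chars)
    · -- last chunk: end = total_len, loop breaks
      rw [if_pos hbreak]
      have hend : total_len ≤ k * (max_chars - overlap) + max_chars := by omega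
      -- k must be n - 1
      have hklast : k = n - 1 := by
        by_contra hne
        have := hn1b k hk0 (by omega)
        omega
      subst hklast
      rw [PySem.List.pyRange_one_cons (by omega), PySem.List.pyRange_one_eq_nil (by omega)]
      simp
    · rw [if_neg hbreak]
      have hend : k * (max_chars - overlap) + max_chars < total_len := by omega
      have hmin : min total_len (k * (max_chars - overlap) + max_chars)
          = k * (max_chars - overlap) + max_chars := by omega
      rw [hmin]
      have hnext : k * (max_chars - overlap) + max_chars - overlap = (k + 1) * (max_chars - overlap) := by ring
      rw [hnext]
      by_cases hk1 : k + 1 < n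
      · rw [ih (k + 1) _ (by omega) hk1 (by omega)]
        rw [show PySem.List.pyRange k n 1 = k :: PySem.List.pyRange (k + 1) n 1 from
          PySem.List.pyRange_one_cons (by omega)]
        simp [hmin]
      · -- k + 1 = n: the recursive call's loop condition fails (start ≥ total_len)
        have hkn' : k + 1 = n := by omega
        have hge : total_len ≤ (k + 1) * (max_chars - overlap) := by
          rcases hn1a with h | h
          · exfalso
            have hn' : n - 1 = k := by omega
            rw [hn'] at h
            omega
          · rw [hkn']; exact h
        have : chunkLoopA fuel total_len max_chars overlap ((k + 1) * (max_chars - overlap))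
            (acc ++ [(k * (max_chars - overlap), k * (max_chars - overlap) + max_chars)]) =
            acc ++ [(k * (max_chars - overlap), k * (max_chars - overlap) + max_chars)] := by
          cases fuel with
          | zero => rfl
          | succ fuel => rw [chunkLoopA, if_neg (by omega)]
        rw [this, show PySem.List.pyRange k n 1 = k :: PySem.List.pyRange (k + 1) n 1 from
          PySem.List.pyRange_one_cons (by omega), PySem.List.pyRange_one_eq_nil (by omega)]
        simp [hmin]

-- ===== VERDICT (by name: the statement is the Claim_ definition above) =====
theorem chunk_bounds_py_spec : Claim_equal_chunk_bounds_py := by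
  intro T M ov hdom hpre
  unfold Spec_chunk_bounds_py chunk_bounds_py chunk_bounds_py_alt
  by_cases h0 : T ≤ 0
  · simp [h0]
  · rw [if_neg h0, if_neg h0]
    by_cases hM : T ≤ M
    · simp [hM]
    · rw [if_neg hM, if_neg hM]
      have hov : ov < M := by rcases hpre with h | h | h <;> omega
      have hstep : 0 < M - ov := by omega
      set step := M - ov with hstepdef
      set n1 : Int := PySem.Int.floordiv (T - M + step - 1) step + 1 with hn1
      set n2 : Int := PySem.Int.floordiv (T + step - 1) step with hn2
      have hc1 := (PySem.Int.floordiv_eq_iff_of_pos (a := T - M + step - 1) (b := step)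
        (q := n1 - 1) hstep).1 (by omega)
      have hc2 := (PySem.Int.floordiv_eq_iff_of_pos (a := T + step - 1) (b := step)
        (q := n2) hstep).1 (by omega)
      set n := min n1 n2 with hn
      -- basic bounds
      have hn1pos : 1 ≤ n1 := by nlinarith [hc1.2]
      have hn2pos : 1 ≤ n2 := by nlinarith [hc2.2]
      have hnpos : 1 ≤ n := by omega
      have hn2T : n2 ≤ T := by nlinarith [hc2.1]
      have key := chunkLoopA_eq T M ov (by omega) hov n
        (by
          by_cases hcase : n = n1
          · left; rw [hcase]; nlinarith [hc1.1]
          · right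
            have : n = n2 := by omega
            rw [this]; nlinarith [hc2.1])
        (by
          intro k hk0 hklt
          have hkn1 : k < n1 - 1 := by omega
          have : k * step ≤ (n1 - 2) * step := mul_le_mul_of_nonneg_right (by omega) (by omega)
          nlinarith [hc1.2])
        (by
          have : (n - 1) * step ≤ (n2 - 1) * step := mul_le_mul_of_nonneg_right (by omega) (by omega)
          nlinarith [hc2.2])
        (T.toNat + 1) 0 [] (le_refl 0) (by omega) (by omega)
      simpa using key
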